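-- pv_equiv track=rewrite | github.com/pateljill2143-arch/global-news-intelligence | process_articles.py | extract_smart_relationships
-- ===== SOURCE A (Python) =====
-- def extract_smart_relationships(text, entity_list):
--     """
--     Extract relationships between entities using enhanced pattern matching
--     Returns list of (entity1, relation, entity2) tuples
--     """
--     relationships = []
--     text_lower = text.lower()
--
--     # Try to find pairs of entities with verbs between them
--     for i, e1 in enumerate(entity_list):
--         for j, e2 in enumerate(entity_list):
--             if i >= j:  # Skip same entity and already checked pairs
--                 continue
--
--             e1_pos = text_lower.find(e1.lower())
--             e2_pos = text_lower.find(e2.lower())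
--
--             if e1_pos != -1 and e2_pos != -1:
--                 # Get text between entities
--                 start = min(e1_pos, e2_pos)
--                 end = max(e1_pos, e2_pos)
--                 between_text = text_lower[start:end]
--
--                 # Determine direction (who's first in sentence)
--                 first_entity = e1 if e1_pos < e2_pos else e2
--                 second_entity = e2 if e1_pos < e2_pos else e1
--
--                 # Find action verb
--                 relation_type = extract_action(text, first_entity, second_entity)
--
--                 # Only add if we found a meaningful relationship
--                 if relation_type != 'MENTIONED_WITH' or len(between_text) < 100:
--                     relationships.append((first_entity, relation_type, second_entity))
--
--     return relationships
--
-- def extract_action(text, entity1, entity2):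
--     """Simplified keyword-based fallback for when dependency parsing doesn't find relationships"""
--
--     # Quick keyword mapping
--     keyword_map = {
--         'attack': 'ATTACKS', 'invade': 'INVADES', 'bomb': 'BOMBS', 'strike': 'STRIKES',
--         'war': 'WAR_WITH', 'fight': 'FIGHTS', 'sanction': 'SANCTIONS', 'trade': 'TRADES_WITH',
--         'support': 'SUPPORTS', 'oppose': 'OPPOSES', 'meet': 'MEETS', 'visit': 'VISITS',
--         'condemn': 'CONDEMNS', 'help': 'HELPS', 'ally': 'ALLIED_WITH', 'partner': 'PARTNERS_WITH'
--     }
--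
--     text_lower = text.lower()
--     e1_pos = text_lower.find(entity1.lower())
--     e2_pos = text_lower.find(entity2.lower())
--
--     if e1_pos != -1 and e2_pos != -1:
--         start = min(e1_pos, e2_pos)
--         end = max(e1_pos, e2_pos)
--         between_text = text_lower[start:end]
--
--         for keyword, relation in keyword_map.items():
--             if keyword in between_text:
--                 return relation
--
--     for keyword, relation in keyword_map.items():
--         if keyword in text_lower:
--             return relation
--
--     return 'MENTIONED_WITH'
-- ===== SOURCE B (Python) =====
-- _KEYWORDS = [
--     ('attack', 'ATTACKS'), ('invade', 'INVADES'), ('bomb', 'BOMBS'), ('strike', 'STRIKES'),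
--     ('war', 'WAR_WITH'), ('fight', 'FIGHTS'), ('sanction', 'SANCTIONS'), ('trade', 'TRADES_WITH'),
--     ('support', 'SUPPORTS'), ('oppose', 'OPPOSES'), ('meet', 'MEETS'), ('visit', 'VISITS'),
--     ('condemn', 'CONDEMNS'), ('help', 'HELPS'), ('ally', 'ALLIED_WITH'), ('partner', 'PARTNERS_WITH'),
-- ]
--
--
-- def _bisect_left(ps, x):
--     lo, hi = 0, len(ps)
--     while lo < hi:
--         mid = (lo + hi) // 2
--         if ps[mid] < x:
--             lo = mid + 1
--         else:
--             hi = mid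
--     return lo
--
--
-- def extract_smart_relationships(text, entity_list):
--     """Same result as the original, but with all text scans hoisted out of the
--     pair loop: entity positions and per-keyword occurrence lists are computed
--     once, and each pair's window is answered from the occurrence index."""
--     tl = text.lower()
--     n = len(tl)
--     # occurrence index: every start position of every keyword, computed once
--     occ = []
--     for kw, rel in _KEYWORDS:
--         ps = []
--         p = tl.find(kw)
--         while p != -1:
--             ps.append(p)
--             p = tl.find(kw, p + 1)
--         occ.append((kw, rel, ps))
--     # text-wide fallback relation, computed once
--     fallback = next((rel for _kw, rel, ps in occ if ps), 'MENTIONED_WITH')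
--     # first-occurrence position of each entity, computed once
--     pos = [tl.find(e.lower()) for e in entity_list]
--     out = []
--     for i in range(len(entity_list)):
--         if pos[i] == -1:
--             continue
--         for j in range(i + 1, len(entity_list)):
--             if pos[j] == -1:
--                 continue
--             if pos[i] < pos[j]:
--                 start, end = pos[i], pos[j]
--                 first, second = entity_list[i], entity_list[j]
--             else:
--                 start, end = pos[j], pos[i]
--                 first, second = entity_list[j], entity_list[i]
--             rel = fallback
--             for kw, r, ps in occ:
--                 k = _bisect_left(ps, start)
--                 if k < len(ps) and ps[k] + len(kw) <= end:
--                     rel = r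
--                     break
--             if rel != 'MENTIONED_WITH' or end - start < 100:
--                 out.append((first, rel, second))
--     return out
-- ===== Notes on version B (the rewrite author's own statement) =====
-- stated objective: faster
-- what changed: B hoists all text scans out of the O(n^2) pair loop: entity first-occurrence positions, per-keyword occurrence-position lists and the whole-text fallback relation are each computed once, and every pair's between-text keyword test is answered by a hand-rolled binary search on the precomputed occurrence list instead of re-running find() and substring scans over the text for every pair.
import Mathlib
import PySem

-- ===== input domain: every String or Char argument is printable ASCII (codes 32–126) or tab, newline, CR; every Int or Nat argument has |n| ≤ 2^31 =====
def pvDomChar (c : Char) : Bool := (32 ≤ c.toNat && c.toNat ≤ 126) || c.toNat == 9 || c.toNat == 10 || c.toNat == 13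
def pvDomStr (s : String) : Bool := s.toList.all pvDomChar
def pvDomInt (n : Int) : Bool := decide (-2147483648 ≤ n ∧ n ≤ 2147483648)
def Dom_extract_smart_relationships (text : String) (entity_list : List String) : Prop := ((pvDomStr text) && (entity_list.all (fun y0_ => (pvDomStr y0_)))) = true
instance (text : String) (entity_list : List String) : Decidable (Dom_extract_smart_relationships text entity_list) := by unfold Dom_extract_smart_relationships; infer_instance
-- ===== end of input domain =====

-- B hoists all text scans out of the pair loop: entity positions and per-keyword occurrence
-- lists are computed once, and each pair's window is answered by binary search on the
-- occurrence lists (objective: faster).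

-- ===== PORT A =====
-- the keyword_map dict literal of extract_action (association list, insertion order)
def pvKeywordMap : List (String × String) :=
  [("attack", "ATTACKS"), ("invade", "INVADES"), ("bomb", "BOMBS"), ("strike", "STRIKES"),
   ("war", "WAR_WITH"), ("fight", "FIGHTS"), ("sanction", "SANCTIONS"), ("trade", "TRADES_WITH"),
   ("support", "SUPPORTS"), ("oppose", "OPPOSES"), ("meet", "MEETS"), ("visit", "VISITS"),
   ("condemn", "CONDEMNS"), ("help", "HELPS"), ("ally", "ALLIED_WITH"), ("partner", "PARTNERS_WITH")]

-- extract_action, line for line (the two for-loops with early return are findSome?)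
def pvExtractAction (text : String) (entity1 : String) (entity2 : String) : String :=
  let text_lower := PySem.Chars.lower text.toList
  let e1_pos := PySem.Chars.find text_lower (PySem.Chars.lower entity1.toList)
  let e2_pos := PySem.Chars.find text_lower (PySem.Chars.lower entity2.toList)
  let r1 : Option String :=
    if e1_pos ≠ -1 ∧ e2_pos ≠ -1 then
      let start := min e1_pos e2_pos
      let stop := max e1_pos e2_pos
      let between_text := PySem.Chars.slice text_lower (some start) (some stop)
      pvKeywordMap.findSome? (fun kv =>
        if PySem.Chars.isIn kv.1.toList between_text then some kv.2 else none)
    else none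
  match r1 with
  | some r => r
  | none =>
    (pvKeywordMap.findSome? (fun kv =>
      if PySem.Chars.isIn kv.1.toList text_lower then some kv.2 else none)).getD "MENTIONED_WITH"

def extract_smart_relationships (text : String) (entity_list : List String) : List (String × String × String) :=
  let text_lower := PySem.Chars.lower text.toList
  (PySem.List.enumerate entity_list).foldl (fun relationships ie =>
    (PySem.List.enumerate entity_list).foldl (fun relationships je =>
      if ie.1 ≥ je.1 then relationships
      else
        let e1_pos := PySem.Chars.find text_lower (PySem.Chars.lower ie.2.toList)
        let e2_pos := PySem.Chars.find text_lower (PySem.Chars.lower je.2.toList)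
        if e1_pos ≠ -1 ∧ e2_pos ≠ -1 then
          let start := min e1_pos e2_pos
          let stop := max e1_pos e2_pos
          let between_text := PySem.Chars.slice text_lower (some start) (some stop)
          let first_entity := if e1_pos < e2_pos then ie.2 else je.2
          let second_entity := if e1_pos < e2_pos then je.2 else ie.2
          let relation_type := pvExtractAction text first_entity second_entity
          if relation_type ≠ "MENTIONED_WITH" ∨ between_text.length < 100 then
            relationships ++ [(first_entity, relation_type, second_entity)]
          else relationships
        else relationships) relationships) []

-- ===== PORT B =====
-- _bisect_left's while loop (lo/hi are nonnegative Python ints; the k ≤ hi etc. are implicit)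
def pvBisectGo (ps : List Int) (x : Int) (lo hi : Nat) : Nat :=
  if _h : lo < hi then
    let mid := (lo + hi) / 2
    if ps.getD mid 0 < x then pvBisectGo ps x (mid + 1) hi else pvBisectGo ps x lo mid
  else lo
termination_by hi - lo
decreasing_by all_goals omega

def pvBisectLeft (ps : List Int) (x : Int) : Nat := pvBisectGo ps x 0 ps.length

-- the `p = tl.find(kw); while p != -1: ps.append(p); p = tl.find(kw, p + 1)` loop of B;
-- the `k ≤ tl.length` test only makes the recursion structural (Python's find returns -1 there too)
def pvOccGo (tl kw : List Char) (k : Nat) : List Int :=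
  if h : k ≤ tl.length then
    let p := PySem.Chars.findFrom tl kw (k : Int)
    if hp : p = -1 then []
    else p :: pvOccGo tl kw (p.toNat + 1)
  else []
termination_by tl.length + 1 - k
decreasing_by
  have hs := PySem.Chars.findFrom_natCast_spec tl kw k h hp
  omega

def pvFindAll (tl kw : List Char) : List Int := pvOccGo tl kw 0

def extract_smart_relationships_alt (text : String) (entity_list : List String) : List (String × String × String) :=
  let tl := PySem.Chars.lower text.toList
  let occ : List (List Char × String × List Int) :=
    pvKeywordMap.map (fun kv => (kv.1.toList, kv.2, pvFindAll tl kv.1.toList))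
  let fallback :=
    (occ.findSome? (fun t => if t.2.2 ≠ [] then some t.2.1 else none)).getD "MENTIONED_WITH"
  let pos := entity_list.map (fun e => PySem.Chars.find tl (PySem.Chars.lower e.toList))
  (List.range entity_list.length).foldl (fun out i =>
    let pi := pos.getD i (-1)
    if pi = -1 then out
    else
      (List.range' (i + 1) (entity_list.length - (i + 1))).foldl (fun out j =>
        let pj := pos.getD j (-1)
        if pj = -1 then out
        else
          let start := if pi < pj then pi else pj
          let stop := if pi < pj then pj else pi
          let first := if pi < pj then entity_list.getD i "" else entity_list.getD j ""
          let second := if pi < pj then entity_list.getD j "" else entity_list.getD i ""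
          let rel :=
            (occ.findSome? (fun t =>
              let k := pvBisectLeft t.2.2 start
              if k < t.2.2.length ∧ (t.2.2.getD k 0) + t.1.length ≤ stop then some t.2.1
              else none)).getD fallback
          if rel ≠ "MENTIONED_WITH" ∨ stop - start < 100 then out ++ [(first, rel, second)]
          else out) out) []

-- ===== PRECONDITION & SPEC =====
def Spec_extract_smart_relationships (text : String) (entity_list : List String) (out : List (String × String × String)) : Prop := out = extract_smart_relationships_alt text entity_list
instance (text : String) (entity_list : List String) (out : List (String × String × String)) : Decidable (Spec_extract_smart_relationships text entity_list out) := by unfold Spec_extract_smart_relationships; infer_instance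

-- ===== CLAIM (what is proved, stated in full; the proofs are below) =====
def Claim_equal_extract_smart_relationships : Prop := ∀ (text : String) (entity_list : List String), Dom_extract_smart_relationships text entity_list → Spec_extract_smart_relationships text entity_list (extract_smart_relationships text entity_list)

-- ===== LEMMAS AND PROOFS =====

-- findSome? congruence
theorem pv_findSome_congr {α β : Type} {l : List α} {f g : α → Option β}
    (h : ∀ x ∈ l, f x = g x) : l.findSome? f = l.findSome? g := by
  induction l with
  | nil => rfl
  | cons a t ih =>
    simp only [List.findSome?_cons, h a (by simp)]
    cases g a with
    | some b => rfl
    | none => exact ih (fun x hx => h x (by simp [hx]))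

-- enumerate as an index map
theorem pv_enum_eq (es : List String) (k : Int) :
    PySem.List.enumerate es k = (List.range es.length).map (fun (i : Nat) => (k + (i : Int), es.getD i "")) := by
  induction es generalizing k with
  | nil => rfl
  | cons x t ih =>
    simp only [PySem.List.enumerate, List.length_cons, List.range_succ_eq_map, List.map_cons,
      List.map_map, ih]
    rw [List.cons_eq_cons]
    refine ⟨by simp [List.getD], ?_⟩
    apply List.map_congr_left
    intro i _
    simp only [Function.comp_apply, List.getD, List.getElem?_cons_succ, Nat.succ_eq_add_one]
    rw [Prod.mk.injEq]
    refine ⟨by push_cast; ring, rfl⟩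

-- restrict a filtered range to its tail
theorem pv_filter_range_ge (X : Nat → Bool) (m n : Nat) (h : m ≤ n) :
    (List.range n).filter (fun q => decide (m ≤ q) && X q) = (List.range' m (n - m)).filter X := by
  have hsplit : List.range n = List.range' 0 m ++ List.range' m (n - m) := by
    rw [List.range_eq_range']
    have := List.range'_append (s := 0) (m := m) (n := n - m) (step := 1)
    simp only [Nat.zero_add, Nat.one_mul] at this
    rw [this]
    congr 1
    omega
  rw [hsplit, List.filter_append]
  have h1 : (List.range' 0 m).filter (fun q => decide (m ≤ q) && X q) = [] := by
    apply List.filter_eq_nil_iff.2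
    intro a ha
    have : a < m := by
      have := List.mem_range'_1.1 ha; omega
    simp [Nat.not_le.2 this]
  have h2 : (List.range' m (n - m)).filter (fun q => decide (m ≤ q) && X q)
      = (List.range' m (n - m)).filter X := by
    apply List.filter_congr
    intro a ha
    have : m ≤ a := (List.mem_range'_1.1 ha).1
    simp [this]
  rw [h1, h2, List.nil_append]

-- the find loop of B collects exactly the occurrence positions ≥ k, in increasing order
theorem pv_occ (tl kw : List Char) (hkw : kw ≠ []) (k : Nat) :
    pvOccGo tl kw k =
      ((List.range tl.length).filter
        (fun q => decide (k ≤ q) && decide (kw <+: tl.drop q))).map (fun (q : Nat) => (q : Int)) := by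
  induction k using pvOccGo.induct tl kw with
  | case1 k h p hp =>
    -- p = -1 : no occurrence at or after k
    rw [pvOccGo]
    have hp' : PySem.Chars.findFrom tl kw (k : Int) = -1 := hp
    rw [dif_pos h, dif_pos hp']
    have hno : ¬ kw <:+: tl.drop k := (PySem.Chars.findFrom_natCast_eq_neg_one_iff tl kw k h).1 hp
    symm
    simp only [List.map_eq_nil_iff, List.filter_eq_nil_iff]
    intro q hq
    simp only [Bool.and_eq_true, decide_eq_true_eq, not_and]
    intro hkq hpre
    refine hno ?_
    have hq2 : kw <+: List.drop (q - k) (List.drop k tl) := by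
      rw [List.drop_drop, show k + (q - k) = q by omega]; exact hpre
    exact hq2.isInfix.trans (List.drop_suffix _ _).isInfix
  | case2 k h p hp ih =>
    rw [pvOccGo]
    have hp' : ¬ PySem.Chars.findFrom tl kw (k : Int) = -1 := hp
    rw [dif_pos h, dif_neg hp']
    obtain ⟨hkp, hpre, hmin⟩ := PySem.Chars.findFrom_natCast_spec tl kw k h hp'
    have hp0 : 0 ≤ p := le_trans (by exact_mod_cast Int.natCast_nonneg k) hkp
    have hplen : p.toNat < tl.length := by
      have hne : tl.drop p.toNat ≠ [] := by
        intro hnil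
        rw [hnil, List.prefix_nil] at hpre
        exact hkw hpre
      have := List.drop_eq_nil_iff.not.1 (by simpa using hne)
      omega
    -- switch the filter's lower bound from k to p.toNat
    have hcongr : (List.range tl.length).filter (fun q => decide (k ≤ q) && decide (kw <+: tl.drop q))
        = (List.range tl.length).filter (fun q => decide (p.toNat ≤ q) && decide (kw <+: tl.drop q)) := by
      apply List.filter_congr
      intro q _
      by_cases hq : p.toNat ≤ q
      · have : k ≤ q := le_trans (by omega) hq
        simp [this, hq]
      · have hql : q < p.toNat := by omega
        by_cases hkq : k ≤ q
        · simp [hkq, hq, hmin q hkq hql]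
        · simp [hkq, hq]
    rw [hcongr, pv_filter_range_ge _ _ _ (by omega)]
    have hsz : tl.length - p.toNat = (tl.length - (p.toNat + 1)) + 1 := by omega
    rw [hsz, List.range'_succ, List.filter_cons]
    rw [if_pos (by simpa using hpre)]
    rw [List.map_cons]
    have : (p.toNat : Int) = p := Int.toNat_of_nonneg hp0
    rw [this, ih, pv_filter_range_ge _ _ _ (by omega)]
  | case3 k h =>
    rw [pvOccGo]
    rw [dif_neg h]
    symm
    simp only [List.map_eq_nil_iff, List.filter_eq_nil_iff]
    intro q hq
    simp only [Bool.and_eq_true, decide_eq_true_eq, not_and]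
    intro hkq _
    exact absurd (le_trans hkq (le_of_lt (List.mem_range.1 hq))) h

theorem pv_occ_sorted (tl kw : List Char) (hkw : kw ≠ []) :
    (pvFindAll tl kw).Pairwise (· < ·) := by
  rw [pvFindAll, pv_occ tl kw hkw]
  refine List.Pairwise.map _ (fun a b hab => by exact_mod_cast hab) ?_
  exact List.Pairwise.filter _ (List.pairwise_lt_range)

theorem pv_occ_mem (tl kw : List Char) (hkw : kw ≠ []) (p : Int) :
    p ∈ pvFindAll tl kw ↔ ∃ q : Nat, (q : Int) = p ∧ q < tl.length ∧ kw <+: tl.drop q := by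
  rw [pvFindAll, pv_occ tl kw hkw]
  simp only [List.mem_map, List.mem_filter, List.mem_range, Bool.and_eq_true, decide_eq_true_eq]
  constructor
  · rintro ⟨q, ⟨hq, _, hpre⟩, rfl⟩
    exact ⟨q, rfl, hq, hpre⟩
  · rintro ⟨q, rfl, hq, hpre⟩
    exact ⟨q, ⟨hq, Nat.zero_le q, hpre⟩, rfl⟩

-- bisect invariant: pvBisectGo returns the first index ≥ lo whose element is ≥ x
theorem pv_bisect_go_spec (ps : List Int) (x : Int) (hs : ps.Pairwise (· < ·)) :
    ∀ lo hi, lo ≤ hi → hi ≤ ps.length →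
      (∀ i, i < lo → (hi_ : i < ps.length) → ps[i] < x) →
      (∀ i, hi ≤ i → (hi_ : i < ps.length) → x ≤ ps[i]) →
      lo ≤ pvBisectGo ps x lo hi ∧ pvBisectGo ps x lo hi ≤ hi ∧
      (∀ i, i < pvBisectGo ps x lo hi → (hi_ : i < ps.length) → ps[i] < x) ∧
      (∀ i, pvBisectGo ps x lo hi ≤ i → (hi_ : i < ps.length) → x ≤ ps[i]) := by
  intro lo hi
  induction lo, hi using pvBisectGo.induct ps x with
  | case1 lo hi h mid hlt ih =>
    intro hlohi hhil hbelow habove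
    have hmideq : mid = (lo + hi) / 2 := rfl
    rw [pvBisectGo, dif_pos h, if_pos hlt]
    rw [hmideq] at hlt ih
    have hmid : lo ≤ (lo + hi) / 2 ∧ (lo + hi) / 2 < hi := by constructor <;> omega
    have hmidl : (lo + hi) / 2 < ps.length := by omega
    have hltE : ps[(lo + hi) / 2] < x := by
      rw [← List.getD_eq_getElem ps 0 hmidl]; exact hlt
    have hb' : ∀ i, i < (lo + hi) / 2 + 1 → (hi_ : i < ps.length) → ps[i] < x := by
      intro i hi1 hi2
      have : ps[i] ≤ ps[(lo + hi) / 2] := by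
        rcases Nat.lt_or_ge i ((lo + hi) / 2) with hlt2 | hge
        · exact le_of_lt (List.pairwise_iff_getElem.1 hs i _ hi2 hmidl hlt2)
        · have : i = (lo + hi) / 2 := by omega
          subst this; exact le_refl _
      exact lt_of_le_of_lt this hltE
    obtain ⟨h1, h2, h3, h4⟩ := ih (by omega) hhil hb' habove
    exact ⟨by omega, h2, h3, h4⟩
  | case2 lo hi h mid hge ih =>
    intro hlohi hhil hbelow habove
    have hmideq : mid = (lo + hi) / 2 := rfl
    rw [pvBisectGo, dif_pos h, if_neg hge]
    rw [hmideq] at hge ih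
    have hmid : lo ≤ (lo + hi) / 2 ∧ (lo + hi) / 2 < hi := by constructor <;> omega
    have hmidl : (lo + hi) / 2 < ps.length := by omega
    have hgeE : x ≤ ps[(lo + hi) / 2] := by
      rw [← List.getD_eq_getElem ps 0 hmidl]; omega
    have habove' : ∀ i, (lo + hi) / 2 ≤ i → (hi_ : i < ps.length) → x ≤ ps[i] := by
      intro i hi1 hi2
      have : ps[(lo + hi) / 2] ≤ ps[i] := by
        rcases Nat.lt_or_ge ((lo + hi) / 2) i with hlt3 | hge3
        · exact le_of_lt (List.pairwise_iff_getElem.1 hs _ i hmidl hi2 hlt3)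
        · have : (lo + hi) / 2 = i := by omega
          subst this; exact le_refl _
      omega
    obtain ⟨h1, h2, h3, h4⟩ := ih (by omega) (by omega) hbelow habove'
    refine ⟨h1, by omega, h3, ?_⟩
    intro i hi1 hi2
    rcases Nat.lt_or_ge i ((lo + hi) / 2) with hlt4 | hge4
    · exact h4 i (by omega) hi2
    · exact habove' i hge4 hi2
  | case3 lo hi h =>
    intro hlohi hhil hbelow habove
    rw [pvBisectGo, dif_neg h]
    exact ⟨le_refl _, by omega, hbelow, fun i hi1 hi2 => habove i (by omega) hi2⟩

-- the hit test of B's inner loop, as an existential over the occurrence list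
theorem pv_hit_iff (ps : List Int) (hs : ps.Pairwise (· < ·)) (x L e : Int) :
    (pvBisectLeft ps x < ps.length ∧ (ps.getD (pvBisectLeft ps x) 0) + L ≤ e) ↔
      ∃ p ∈ ps, x ≤ p ∧ p + L ≤ e := by
  obtain ⟨h0, hlen, hbelow, habove⟩ :=
    pv_bisect_go_spec ps x hs 0 ps.length (Nat.zero_le _) (le_refl _)
      (fun i hi1 _ => absurd hi1 (Nat.not_lt_zero i)) (fun i hi1 hi2 => absurd hi1 (by omega))
  rw [pvBisectLeft] at *
  set r := pvBisectGo ps x 0 ps.length with hr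
  constructor
  · rintro ⟨hrl, hle⟩
    rw [List.getD_eq_getElem ps 0 hrl] at hle
    exact ⟨ps[r], List.getElem_mem hrl, habove r (le_refl _) hrl, hle⟩
  · rintro ⟨p, hmem, hxp, hpe⟩
    obtain ⟨i, hil, rfl⟩ := List.mem_iff_getElem.1 hmem
    have hri : r ≤ i := by
      by_contra hcon
      exact absurd hxp (not_le.2 (hbelow i (by omega) hil))
    have hrl : r < ps.length := by omega
    refine ⟨hrl, ?_⟩
    rw [List.getD_eq_getElem ps 0 hrl]
    have : ps[r] ≤ ps[i] := by
      rcases Nat.lt_or_ge r i with hlt3 | hge3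
      · exact le_of_lt (List.pairwise_iff_getElem.1 hs r i hrl hil hlt3)
      · have : r = i := by omega
        subst this; exact le_refl _
    omega

-- `kw in text_lower[start:stop]` says: kw occurs at some position inside the window
theorem pv_isIn_slice (tl kw : List Char) (hkw : kw ≠ []) (s e : Int)
    (h0 : 0 ≤ s) (hse : s ≤ e) (hen : e ≤ (tl.length : Int)) :
    PySem.Chars.isIn kw (PySem.Chars.slice tl (some s) (some e)) = true ↔
      ∃ q : Nat, s ≤ (q : Int) ∧ (q : Int) + kw.length ≤ e ∧ kw <+: tl.drop q := by
  rw [PySem.Chars.slice_eq_listSlice,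
    PySem.List.slice_of_nonneg tl h0 (le_trans h0 hse) (le_trans hse hen) hen]
  rw [← PySem.Chars.exists_prefix_drop_iff_isIn]
  constructor
  · rintro ⟨j, hj⟩
    rw [List.drop_take, List.drop_drop] at hj
    have hj2 := (List.prefix_take_iff.1 hj)
    refine ⟨s.toNat + j, by omega, ?_, hj2.1⟩
    have hlen := hj2.2
    have hdl : kw.length ≤ tl.length - (s.toNat + j) := by
      have := hj2.1.length_le
      simp only [List.length_drop] at this
      omega
    have hk1 : 0 < kw.length := List.length_pos_of_ne_nil hkw
    omega
  · rintro ⟨q, hq1, hq2, hq3⟩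
    refine ⟨q - s.toNat, ?_⟩
    rw [List.drop_take, List.drop_drop]
    rw [show s.toNat + (q - s.toNat) = q by omega]
    refine List.prefix_take_iff.2 ⟨hq3, by omega⟩

-- `kw in text_lower` says: the occurrence list of kw is non-empty
theorem pv_isIn_occ (tl kw : List Char) (hkw : kw ≠ []) :
    PySem.Chars.isIn kw tl = true ↔ pvFindAll tl kw ≠ [] := by
  rw [← PySem.Chars.exists_prefix_drop_iff_isIn]
  constructor
  · rintro ⟨j, hj⟩
    have hjl : j < tl.length := by
      by_contra hcon
      rw [List.drop_eq_nil_iff.2 (by omega), List.prefix_nil] at hj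
      exact hkw hj
    intro hnil
    have := (pv_occ_mem tl kw hkw (j : Int)).2 ⟨j, rfl, hjl, hj⟩
    rw [hnil] at this
    exact absurd this (List.not_mem_nil)
  · intro hne
    obtain ⟨p, hp⟩ := List.exists_mem_of_ne_nil _ hne
    obtain ⟨q, _, _, hpre⟩ := (pv_occ_mem tl kw hkw p).1 hp
    exact ⟨q, hpre⟩

theorem pv_kw_ne : ∀ kv ∈ pvKeywordMap, kv.1.toList ≠ [] := by decide

-- B's per-window findSome? equals A's `kw in between_text` findSome?
theorem pv_findSome_window (tl : List Char) (s e : Int)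
    (h0 : 0 ≤ s) (hse : s ≤ e) (hen : e ≤ (tl.length : Int)) :
    ((pvKeywordMap.map (fun kv => (kv.1.toList, kv.2, pvFindAll tl kv.1.toList))).findSome?
      (fun t =>
        let k := pvBisectLeft t.2.2 s
        if k < t.2.2.length ∧ (t.2.2.getD k 0) + t.1.length ≤ e then some t.2.1 else none)) =
    pvKeywordMap.findSome? (fun kv =>
      if PySem.Chars.isIn kv.1.toList (PySem.Chars.slice tl (some s) (some e)) then some kv.2
      else none) := by
  rw [List.findSome?_map]
  apply pv_findSome_congr
  intro kv hkv
  have hkw := pv_kw_ne kv hkv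
  simp only [Function.comp_apply]
  have hhit := pv_hit_iff (pvFindAll tl kv.1.toList) (pv_occ_sorted tl kv.1.toList hkw) s
    (kv.1.toList.length) e
  have hiff : (pvBisectLeft (pvFindAll tl kv.1.toList) s < (pvFindAll tl kv.1.toList).length ∧
      ((pvFindAll tl kv.1.toList).getD (pvBisectLeft (pvFindAll tl kv.1.toList) s) 0) +
        kv.1.toList.length ≤ e) ↔
      PySem.Chars.isIn kv.1.toList (PySem.Chars.slice tl (some s) (some e)) = true := by
    rw [hhit, pv_isIn_slice tl kv.1.toList hkw s e h0 hse hen]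
    constructor
    · rintro ⟨p, hmem, hxp, hpe⟩
      obtain ⟨q, rfl, hql, hpre⟩ := (pv_occ_mem tl kv.1.toList hkw p).1 hmem
      exact ⟨q, hxp, hpe, hpre⟩
    · rintro ⟨q, hq1, hq2, hq3⟩
      have hk1 : 0 < kv.1.toList.length := List.length_pos_of_ne_nil hkw
      have hql : q < tl.length := by omega
      exact ⟨(q : Int), (pv_occ_mem tl kv.1.toList hkw q).2 ⟨q, rfl, hql, hq3⟩, hq1, hq2⟩
  by_cases hc : PySem.Chars.isIn kv.1.toList (PySem.Chars.slice tl (some s) (some e)) = true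
  · rw [if_pos hc, if_pos (hiff.2 hc)]
  · rw [if_neg hc, if_neg (fun hh => hc (hiff.1 hh))]

-- B's fallback findSome? equals A's whole-text findSome?
theorem pv_findSome_fallback (tl : List Char) :
    ((pvKeywordMap.map (fun kv => (kv.1.toList, kv.2, pvFindAll tl kv.1.toList))).findSome?
      (fun t => if t.2.2 ≠ [] then some t.2.1 else none)) =
    pvKeywordMap.findSome? (fun kv =>
      if PySem.Chars.isIn kv.1.toList tl then some kv.2 else none) := by
  rw [List.findSome?_map]
  apply pv_findSome_congr
  intro kv hkv
  have hkw := pv_kw_ne kv hkv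
  simp only [Function.comp_apply]
  have hiff := pv_isIn_occ tl kv.1.toList hkw
  by_cases hc : PySem.Chars.isIn kv.1.toList tl = true
  · rw [if_pos hc, if_pos (hiff.1 hc)]
  · rw [if_neg hc, if_neg (fun hh => hc (hiff.2 hh))]

-- the value appended (or not) for one ordered pair, A's way
def pvItemA (text e1 e2 : String) : List (String × String × String) :=
  let text_lower := PySem.Chars.lower text.toList
  let e1_pos := PySem.Chars.find text_lower (PySem.Chars.lower e1.toList)
  let e2_pos := PySem.Chars.find text_lower (PySem.Chars.lower e2.toList)
  if e1_pos ≠ -1 ∧ e2_pos ≠ -1 then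
    let start := min e1_pos e2_pos
    let stop := max e1_pos e2_pos
    let between_text := PySem.Chars.slice text_lower (some start) (some stop)
    let first_entity := if e1_pos < e2_pos then e1 else e2
    let second_entity := if e1_pos < e2_pos then e2 else e1
    let relation_type := pvExtractAction text first_entity second_entity
    if relation_type ≠ "MENTIONED_WITH" ∨ between_text.length < 100 then
      [(first_entity, relation_type, second_entity)]
    else []
  else []

-- the value appended (or not) for one ordered pair, B's way
def pvItemB (text e1 e2 : String) : List (String × String × String) :=
  let tl := PySem.Chars.lower text.toList
  let occ := pvKeywordMap.map (fun kv => (kv.1.toList, kv.2, pvFindAll tl kv.1.toList))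
  let fallback := (occ.findSome? (fun t => if t.2.2 ≠ [] then some t.2.1 else none)).getD "MENTIONED_WITH"
  let pi := PySem.Chars.find tl (PySem.Chars.lower e1.toList)
  let pj := PySem.Chars.find tl (PySem.Chars.lower e2.toList)
  if pi = -1 then []
  else if pj = -1 then []
  else
    let start := if pi < pj then pi else pj
    let stop := if pi < pj then pj else pi
    let first := if pi < pj then e1 else e2
    let second := if pi < pj then e2 else e1
    let rel :=
      (occ.findSome? (fun t =>
        let k := pvBisectLeft t.2.2 start
        if k < t.2.2.length ∧ (t.2.2.getD k 0) + t.1.length ≤ stop then some t.2.1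
        else none)).getD fallback
    if rel ≠ "MENTIONED_WITH" ∨ stop - start < 100 then [(first, rel, second)] else []

theorem pv_item_eq (text e1 e2 : String) : pvItemA text e1 e2 = pvItemB text e1 e2 := by
  simp only [pvItemA, pvItemB]
  set tl := PySem.Chars.lower text.toList with htl
  set p1 := PySem.Chars.find tl (PySem.Chars.lower e1.toList) with hp1d
  set p2 := PySem.Chars.find tl (PySem.Chars.lower e2.toList) with hp2d
  by_cases h1 : p1 = -1
  · rw [if_neg (by tauto), if_pos h1]
  by_cases h2 : p2 = -1
  · rw [if_neg (by tauto), if_neg h1, if_pos h2]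
  rw [if_pos ⟨h1, h2⟩, if_neg h1, if_neg h2]
  have hge1 : -1 ≤ p1 := PySem.Chars.neg_one_le_find tl _
  have hge2 : -1 ≤ p2 := PySem.Chars.neg_one_le_find tl _
  have hle1 : p1 ≤ (tl.length : Int) := PySem.Chars.find_le_length tl _
  have hle2 : p2 ≤ (tl.length : Int) := PySem.Chars.find_le_length tl _
  have h01 : 0 ≤ p1 := by omega
  have h02 : 0 ≤ p2 := by omega
  have hsmin : (if p1 < p2 then p1 else p2) = min p1 p2 := by split_ifs <;> omega
  have hsmax : (if p1 < p2 then p2 else p1) = max p1 p2 := by split_ifs <;> omega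
  rw [hsmin, hsmax]
  -- the relation computed by A's extract_action equals B's occurrence-index lookup
  have hrel : pvExtractAction text (if p1 < p2 then e1 else e2) (if p1 < p2 then e2 else e1) =
      ((pvKeywordMap.map (fun kv => (kv.1.toList, kv.2, pvFindAll tl kv.1.toList))).findSome?
        (fun t =>
          let k := pvBisectLeft t.2.2 (min p1 p2)
          if k < t.2.2.length ∧ (t.2.2.getD k 0) + t.1.length ≤ max p1 p2 then some t.2.1
          else none)).getD
        (((pvKeywordMap.map (fun kv => (kv.1.toList, kv.2, pvFindAll tl kv.1.toList))).findSome?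
          (fun t => if t.2.2 ≠ [] then some t.2.1 else none)).getD "MENTIONED_WITH") := by
    rw [pv_findSome_window tl (min p1 p2) (max p1 p2) (by omega) (by omega) (by omega),
      pv_findSome_fallback tl]
    simp only [pvExtractAction, ← htl]
    have hfs : PySem.Chars.find tl (PySem.Chars.lower (if p1 < p2 then e1 else e2).toList) = min p1 p2 := by
      split_ifs with h <;> [rw [← hp1d]; rw [← hp2d]] <;> omega
    have hss : PySem.Chars.find tl (PySem.Chars.lower (if p1 < p2 then e2 else e1).toList) = max p1 p2 := by
      split_ifs with h <;> [rw [← hp2d]; rw [← hp1d]] <;> omega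
    rw [hfs, hss]
    rw [if_pos ⟨by omega, by omega⟩]
    rw [min_eq_left min_le_max, max_eq_right min_le_max]
    cases pvKeywordMap.findSome? (fun kv =>
        if PySem.Chars.isIn kv.1.toList
            (PySem.Chars.slice tl (some (min p1 p2)) (some (max p1 p2))) then some kv.2
        else none) with
    | some r => rfl
    | none => rfl
  rw [hrel]
  refine if_congr (or_congr_right ?_) rfl rfl
  -- the length test: len(text_lower[start:stop]) < 100  ↔  stop - start < 100
  have hlen : (PySem.Chars.slice tl (some (min p1 p2)) (some (max p1 p2))).length
      = (max p1 p2 - min p1 p2).toNat := by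
    rw [PySem.Chars.slice_eq_listSlice, PySem.List.length_slice]
    rw [show max p1 p2 = ((max p1 p2).toNat : Int) by omega,
      show min p1 p2 = ((min p1 p2).toNat : Int) by omega,
      PySem.List.clampIdx_natCast, PySem.List.clampIdx_natCast]
    omega
  rw [hlen]
  omega

-- drop the `i >= j: continue` guard: only j in (i, n) survives
theorem pv_range_split {α : Type} (n i : Nat) (hi : i < n) (g : Nat → List α) :
    (List.range n).flatMap (fun j => if j ≤ i then [] else g j) =
      (List.range' (i + 1) (n - (i + 1))).flatMap g := by
  have hsplit : List.range n = List.range' 0 (i + 1) ++ List.range' (i + 1) (n - (i + 1)) := by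
    rw [List.range_eq_range']
    have := List.range'_append (s := 0) (m := i + 1) (n := n - (i + 1)) (step := 1)
    simp only [Nat.zero_add, Nat.one_mul] at this
    rw [this]
    congr 1
    omega
  rw [hsplit, List.flatMap_append]
  have h1 : (List.range' 0 (i + 1)).flatMap (fun j => if j ≤ i then [] else g j) = [] := by
    rw [List.flatMap_eq_nil_iff]
    intro j hj
    have := List.mem_range'_1.1 hj
    rw [if_pos (by omega)]
  have h2 : (List.range' (i + 1) (n - (i + 1))).flatMap (fun j => if j ≤ i then [] else g j) =
      (List.range' (i + 1) (n - (i + 1))).flatMap g := by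
    apply List.flatMap_congr
    intro j hj
    have := List.mem_range'_1.1 hj
    rw [if_neg (by omega)]
  rw [h1, h2, List.nil_append]

-- A as a flat double loop over index pairs
theorem pv_A_flat (text : String) (es : List String) :
    extract_smart_relationships text es =
      (PySem.List.enumerate es).flatMap (fun ie =>
        (PySem.List.enumerate es).flatMap (fun je =>
          if ie.1 ≥ je.1 then [] else pvItemA text ie.2 je.2)) := by
  simp only [extract_smart_relationships]
  refine Eq.trans (PySem.List.foldl_congr_mem _ _
    (fun rels ie => rels ++ (PySem.List.enumerate es).flatMap (fun je =>
      if ie.1 ≥ je.1 then [] else pvItemA text ie.2 je.2)) _ ?_) ?_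
  · intro rels ie _
    refine Eq.trans (PySem.List.foldl_congr_mem _ _
      (fun acc je => acc ++ (if ie.1 ≥ je.1 then [] else pvItemA text ie.2 je.2)) _ ?_) ?_
    · intro acc je _
      simp only [pvItemA]
      split_ifs <;> simp
    · rw [PySem.List.foldl_append_eq_flatMap]
  · rw [PySem.List.foldl_append_eq_flatMap, List.nil_append]

-- B as the same flat double loop
theorem pv_B_flat (text : String) (es : List String) :
    extract_smart_relationships_alt text es =
      (List.range es.length).flatMap (fun i =>
        (List.range' (i + 1) (es.length - (i + 1))).flatMap (fun j =>
          pvItemB text (es.getD i "") (es.getD j ""))) := by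
  simp only [extract_smart_relationships_alt]
  have hpos : ∀ k, k < es.length →
      (es.map (fun e => PySem.Chars.find (PySem.Chars.lower text.toList)
        (PySem.Chars.lower e.toList))).getD k (-1) =
      PySem.Chars.find (PySem.Chars.lower text.toList)
        (PySem.Chars.lower (es.getD k "").toList) := by
    intro k hk
    rw [List.getD_eq_getElem _ _ (by simpa using hk), List.getElem_map,
      List.getD_eq_getElem _ _ hk]
  refine Eq.trans (PySem.List.foldl_congr_mem _ _
    (fun out i => out ++ (List.range' (i + 1) (es.length - (i + 1))).flatMap (fun j =>
      pvItemB text (es.getD i "") (es.getD j ""))) _ ?_) ?_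
  · intro out i hi
    have hin : i < es.length := List.mem_range.1 hi
    rw [hpos i hin]
    by_cases hc : PySem.Chars.find (PySem.Chars.lower text.toList)
        (PySem.Chars.lower (es.getD i "").toList) = -1
    · rw [if_pos hc]
      symm
      beta_reduce
      rw [List.append_right_eq_self, List.flatMap_eq_nil_iff]
      intro j _
      simp only [pvItemB]
      rw [if_pos hc]
    · rw [if_neg hc]
      refine Eq.trans (PySem.List.foldl_congr_mem _ _
        (fun acc j => acc ++ pvItemB text (es.getD i "") (es.getD j "")) _ ?_) ?_
      · intro acc j hj
        have hjn : j < es.length := by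
          have := List.mem_range'_1.1 hj
          omega
        rw [hpos j hjn]
        simp only [pvItemB]
        rw [if_neg hc]
        split_ifs <;> simp
      · rw [PySem.List.foldl_append_eq_flatMap]
  · rw [PySem.List.foldl_append_eq_flatMap, List.nil_append]

theorem pv_main (text : String) (es : List String) :
    extract_smart_relationships text es = extract_smart_relationships_alt text es := by
  rw [pv_A_flat, pv_B_flat, pv_enum_eq es 0, List.flatMap_map]
  apply List.flatMap_congr
  intro i hi
  have hin : i < es.length := List.mem_range.1 hi
  rw [List.flatMap_map]
  refine Eq.trans (List.flatMap_congr
    (l := List.range es.length)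
    (g := fun j => if j ≤ i then [] else pvItemA text (es.getD i "") (es.getD j "")) ?_) ?_
  · intro j _
    by_cases hj : j ≤ i
    · rw [if_pos (show (0 + (i : Int), es.getD i "").1 ≥ (0 + (j : Int), es.getD j "").1 by
        simp; omega)]
      simp [hj]
    · rw [if_neg (show ¬ (0 + (i : Int), es.getD i "").1 ≥ (0 + (j : Int), es.getD j "").1 by
        simp; omega)]
      simp [hj]
  · rw [pv_range_split es.length i hin]
    apply List.flatMap_congr
    intro j _
    exact pv_item_eq text _ _

-- ===== VERDICT (by name: the statement is the Claim_ definition above) =====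
theorem extract_smart_relationships_spec : Claim_equal_extract_smart_relationships := by
  intro text entity_list _
  unfold Spec_extract_smart_relationships
  exact pv_main text entity_list
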